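-- pv_equiv track=rewrite | github.com/SEG-UNIBE/IntelliSorts | intellisorts_presortedness_metrics.py | max_dist_inversion_comp
-- ===== SOURCE A (Python) =====
-- def max_dist_inversion_comp(arr):
--     """
--     Number of comparisons needed for Max Distance computation
--     """
--     c_max_dist = 0
--     count = 0
--
--     for key in range(len(arr)):
--         for j in range(key):
--             count += 1
--             if arr[key] < arr[j]:
--                 c_max_dist = max(key-j,c_max_dist)
--
--     return count
-- ===== SOURCE B (Python) =====
-- def max_dist_inversion_comp(arr):
--     """
--     Number of comparisons needed for Max Distance computation
--     """
--     n = len(arr)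
--     return n * (n - 1) // 2
-- ===== Notes on version B (the rewrite author's own statement) =====
-- stated objective: faster
-- what changed: A counts comparisons with a nested double loop (the count is independent of the element values); B returns the closed form n*(n-1)//2 directly.
import Mathlib
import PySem

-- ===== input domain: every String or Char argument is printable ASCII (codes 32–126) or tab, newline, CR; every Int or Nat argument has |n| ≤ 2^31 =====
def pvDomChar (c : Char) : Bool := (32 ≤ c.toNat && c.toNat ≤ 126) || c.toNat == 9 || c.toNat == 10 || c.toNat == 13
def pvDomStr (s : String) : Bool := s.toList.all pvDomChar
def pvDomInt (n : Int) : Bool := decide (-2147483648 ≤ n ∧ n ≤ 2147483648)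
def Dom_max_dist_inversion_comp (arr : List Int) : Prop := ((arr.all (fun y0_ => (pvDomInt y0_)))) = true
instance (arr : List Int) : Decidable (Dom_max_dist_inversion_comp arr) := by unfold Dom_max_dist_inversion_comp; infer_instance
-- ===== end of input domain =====

-- B replaces A's nested counting loop with the closed form n*(n-1)//2 (asymptotically faster).


-- ===== PORT A =====
-- literal transliteration: state is (c_max_dist, count), nested loops over range(len(arr)) / range(key)
def max_dist_inversion_comp (arr : List Int) : Int :=
  let st :=
    (PySem.List.pyRange 0 arr.length 1).foldl
      (fun (s : Int × Int) key =>
        (PySem.List.pyRange 0 key 1).foldl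
          (fun (s : Int × Int) j =>
            let count := s.2 + 1
            let c_max_dist :=
              if PySem.List.pyGetD arr key 0 < PySem.List.pyGetD arr j 0 then
                max (key - j) s.1
              else s.1
            (c_max_dist, count))
          s)
      (0, 0)
  st.2

-- ===== PORT B =====
def max_dist_inversion_comp_alt (arr : List Int) : Int :=
  let n : Int := arr.length
  PySem.Int.floordiv (n * (n - 1)) 2

-- ===== PRECONDITION & SPEC =====
def Spec_max_dist_inversion_comp (arr : List Int) (out : Int) : Prop := out = max_dist_inversion_comp_alt arr
instance (arr : List Int) (out : Int) : Decidable (Spec_max_dist_inversion_comp arr out) := by unfold Spec_max_dist_inversion_comp; infer_instance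

-- ===== CLAIM (what is proved, stated in full; the proofs are below) =====
def Claim_equal_max_dist_inversion_comp : Prop := ∀ (arr : List Int), Dom_max_dist_inversion_comp arr → Spec_max_dist_inversion_comp arr (max_dist_inversion_comp arr)

-- ===== LEMMAS AND PROOFS =====

-- the inner loop adds its length to the count component, whatever f does to the first component
theorem pv_inner_count (arr : List Int) (key : Int) (l : List Int) (s : Int × Int) :
    (l.foldl
      (fun (s : Int × Int) j =>
        (if PySem.List.pyGetD arr key 0 < PySem.List.pyGetD arr j 0 then max (key - j) s.1 else s.1,
         s.2 + 1)) s).2 = s.2 + l.length := by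
  induction l generalizing s with
  | nil => simp
  | cons x xs ih => simp [List.foldl, ih]; omega

-- the outer loop over range(0,n,1) ends with count = n*(n-1)/2
theorem pv_outer_count (n : Nat) (arr : List Int) (s : Int × Int) :
    ((PySem.List.pyRange 0 n 1).foldl
      (fun (s : Int × Int) key =>
        (PySem.List.pyRange 0 key 1).foldl
          (fun (s : Int × Int) j =>
            (if PySem.List.pyGetD arr key 0 < PySem.List.pyGetD arr j 0 then max (key - j) s.1 else s.1,
             s.2 + 1)) s) s).2
      = s.2 + (n * (n - 1) / 2 : Nat) := by
  induction n generalizing s with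
  | zero => simp
  | succ m ih =>
    rw [show ((m + 1 : Nat) : Int) = (m : Int) + 1 by push_cast; ring,
        PySem.List.pyRange_one_succ_right (by positivity), List.foldl_append]
    simp only [List.foldl_cons, List.foldl_nil]
    rw [pv_inner_count, ih]
    rw [PySem.List.length_pyRange_one]
    have : ((m : Int) - 0).toNat = m := by omega
    rw [this]
    have h3 : (m + 1) * (m + 1 - 1) = m * (m - 1) + m * 2 := by
      cases m with
      | zero => simp
      | succ k => simp; ring
    rw [h3, Nat.add_mul_div_right _ _ (by norm_num : 0 < 2)]
    push_cast; ring

-- ===== VERDICT (by name: the statement is the Claim_ definition above) =====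
theorem max_dist_inversion_comp_spec : Claim_equal_max_dist_inversion_comp := by
  intro arr _
  unfold Spec_max_dist_inversion_comp max_dist_inversion_comp max_dist_inversion_comp_alt
  simp only []
  rw [pv_outer_count arr.length arr (0, 0)]
  generalize arr.length = m
  have hc : ((m : Int)) * ((m : Int) - 1) = ((m * (m - 1) : Nat) : Int) := by
    cases m with
    | zero => simp
    | succ k => push_cast [Nat.succ_sub_one]; ring
  rw [hc, PySem.Int.floordiv_eq_ediv_of_pos (by norm_num)]
  omega
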